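-- pv_equiv track=rewrite | github.com/JulienLie/Pyttern | tests/tests_files/macros/or/simple/increment_3_ok.py | foo
-- ===== SOURCE A (Python) =====
-- def foo(n):
--     count = 0
--     for i in range(n):
--         for j in range(n):
--             if n == i * j:
--                 count += 1
--         i += 1
--     return count
-- ===== SOURCE B (Python) =====
-- def foo(n):
--     # one divisibility test per candidate divisor instead of an inner scan over all j values
--     count = 0
--     for i in range(1, n):
--         if n % i == 0 and n // i < n:
--             count += 1
--     return count
-- ===== Notes on version B (the rewrite author's own statement) =====
-- stated objective: faster
-- what changed: Replaces the O(n^2) double loop testing every pair (i,j) with a single loop over positive candidate divisors below n, counting each via one divisibility test (n % i == 0 and n // i < n), since for each divisor i the matching j is unique.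
import Mathlib
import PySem

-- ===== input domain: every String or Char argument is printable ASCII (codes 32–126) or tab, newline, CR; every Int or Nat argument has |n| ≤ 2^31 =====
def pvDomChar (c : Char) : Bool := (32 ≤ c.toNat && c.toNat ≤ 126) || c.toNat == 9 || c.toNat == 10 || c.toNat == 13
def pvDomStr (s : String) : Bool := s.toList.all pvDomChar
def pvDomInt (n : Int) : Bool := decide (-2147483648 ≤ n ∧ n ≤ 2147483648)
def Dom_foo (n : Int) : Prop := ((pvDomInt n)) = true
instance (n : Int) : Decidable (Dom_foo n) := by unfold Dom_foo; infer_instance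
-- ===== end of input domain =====

-- B replaces A's double pair scan by one divisibility test per positive candidate divisor below n: faster.

-- ===== PORT A =====
def foo (n : Int) : Int :=
  (PySem.List.pyRange 0 n 1).foldl (fun count i =>
    (PySem.List.pyRange 0 n 1).foldl (fun c j => if n == i * j then c + 1 else c) count) 0

-- ===== PORT B =====
def foo_alt (n : Int) : Int :=
  (PySem.List.pyRange 1 n 1).foldl (fun count i =>
    if PySem.Int.mod n i == 0 && PySem.Int.floordiv n i < n then count + 1 else count) 0

-- ===== PRECONDITION & SPEC =====
def Spec_foo (n : Int) (out : Int) : Prop := out = foo_alt n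
instance (n : Int) (out : Int) : Decidable (Spec_foo n out) := by unfold Spec_foo; infer_instance

-- ===== CLAIM (what is proved, stated in full; the proofs are below) =====
def Claim_equal_foo : Prop := ∀ (n : Int), Dom_foo n → Spec_foo n (foo n)

-- ===== LEMMAS AND PROOFS =====

-- inner loop of A counts the j with n = i*j
lemma foo_inner (n i c : Int) :
    (PySem.List.pyRange 0 n 1).foldl (fun c j => if n == i * j then c + 1 else c) c
      = c + ((PySem.List.pyRange 0 n 1).countP (fun j => n == i * j) : Int) :=
  PySem.List.foldl_if_add_one _ _ _

-- splitting off the first element of the summed range (g abstract, so rw cannot capture)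
lemma sum_split (n : Int) (hn : 0 < n) (g : Int → Int) :
    ((PySem.List.pyRange 0 n 1).map g).sum
      = g 0 + ((PySem.List.pyRange 1 n 1).map g).sum := by
  rw [PySem.List.pyRange_one_cons hn]
  norm_num

-- for 1 ≤ i < n, the count of j ∈ [0,n) with n = i*j is B's divisor indicator
lemma count_indicator (n i : Int) (h1 : 1 ≤ i) (h2 : i < n) :
    ((PySem.List.pyRange 0 n 1).countP (fun j => n == i * j) : Int)
      = if PySem.Int.mod n i == 0 && PySem.Int.floordiv n i < n then 1 else 0 := by
  have hi : (0:Int) < i := h1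
  have hmod : PySem.Int.mod n i = n % i := PySem.Int.mod_eq_emod_of_pos hi
  have hdiv : PySem.Int.floordiv n i = n / i := PySem.Int.floordiv_eq_ediv_of_pos hi
  by_cases hdvd : n % i = 0
  · -- i divides n: the unique j is n / i
    have hd : i ∣ n := Int.dvd_of_emod_eq_zero hdvd
    have hmul : i * (n / i) = n := Int.mul_ediv_cancel' hd
    have hcp : (PySem.List.pyRange 0 n 1).countP (fun j => n == i * j)
        = (PySem.List.pyRange 0 n 1).count (n / i) := by
      apply List.countP_congr
      intro j _
      have hiff : (n = i * j) ↔ (j = n / i) := by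
        constructor
        · intro hj
          exact mul_left_cancel₀ (by omega : i ≠ 0) (by rw [hmul, ← hj])
        · intro hj
          rw [hj, hmul]
      simpa using hiff
    rw [hcp]
    by_cases hlt : n / i < n
    · have hmem : n / i ∈ PySem.List.pyRange 0 n 1 := by
        rw [PySem.List.mem_pyRange_one]
        exact ⟨Int.ediv_nonneg (by omega) (by omega), hlt⟩
      rw [List.count_eq_one_of_mem (PySem.List.nodup_pyRange_one 0 n) hmem]
      simp [hmod, hdiv, hdvd, hlt]
    · have hmem : n / i ∉ PySem.List.pyRange 0 n 1 := by
        rw [PySem.List.mem_pyRange_one]; omega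
      rw [List.count_eq_zero_of_not_mem hmem]
      simp [hmod, hdiv, hdvd, hlt]
  · -- i does not divide n: no j works
    have hcp : (PySem.List.pyRange 0 n 1).countP (fun j => n == i * j) = 0 := by
      apply List.countP_eq_zero.mpr
      intro j _
      simp only [beq_iff_eq]
      intro hj
      exact hdvd (Int.emod_eq_zero_of_dvd ⟨j, hj⟩)
    rw [hcp]
    simp [hmod, hdvd]

-- ===== VERDICT (by name: the statement is the Claim_ definition above) =====
theorem foo_spec : Claim_equal_foo := by
  intro n _
  unfold Spec_foo foo foo_alt
  rw [show ((PySem.List.pyRange 1 n 1).foldl (fun count i =>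
      if PySem.Int.mod n i == 0 && PySem.Int.floordiv n i < n then count + 1 else count) 0)
    = 0 + (((PySem.List.pyRange 1 n 1).countP
        (fun i => PySem.Int.mod n i == 0 && PySem.Int.floordiv n i < n) : Int))
    from PySem.List.foldl_if_add_one _ _ _]
  rcases le_or_gt n 0 with hn | hn
  · rw [PySem.List.pyRange_one_eq_nil hn, PySem.List.pyRange_one_eq_nil (by omega)]
    simp
  · have hstep : List.foldl (fun count i =>
          List.foldl (fun c j => if n == i * j then c + 1 else c) count (PySem.List.pyRange 0 n 1))
          0 (PySem.List.pyRange 0 n 1)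
        = List.foldl (fun count i => count +
          ((PySem.List.pyRange 0 n 1).countP (fun j => n == i * j) : Int))
          0 (PySem.List.pyRange 0 n 1) :=
      PySem.List.foldl_congr_mem _ _ _ _ (fun acc x _ => foo_inner n x acc)
    rw [hstep]
    rw [PySem.List.foldl_add]
    rw [sum_split n hn]
    have h0 : ((PySem.List.pyRange 0 n 1).countP (fun j => n == (0:Int) * j) : Int) = 0 := by
      have h0' : (PySem.List.pyRange 0 n 1).countP (fun j => n == (0:Int) * j) = 0 := by
        rw [List.countP_eq_zero]
        intro j hj
        rw [PySem.List.mem_pyRange_one] at hj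
        simp only [zero_mul, beq_iff_eq]
        omega
      exact_mod_cast h0'
    rw [h0]
    rw [show ((PySem.List.pyRange 1 n 1).map
          (fun i => ((PySem.List.pyRange 0 n 1).countP (fun j => n == i * j) : Int)))
        = (PySem.List.pyRange 1 n 1).map
          (fun i => if PySem.Int.mod n i == 0 && PySem.Int.floordiv n i < n then (1:Int) else 0)
        from by
          apply List.map_congr_left
          intro i hi
          rw [PySem.List.mem_pyRange_one] at hi
          exact count_indicator n i (by omega) (by omega)]
    rw [PySem.List.sum_map_ite_one_zero]
    omega
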